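-- pv_equiv track=rewrite | github.com/m1nnh/Problem-Solving | Programmers/직업군 추천하기.py | solution
-- ===== SOURCE A (Python) =====
-- from collections import defaultdict
--
-- def solution(table, languages, preference):
--     table_dic = defaultdict(list)
--     company = ["SI", "CONTENTS", "HARDWARE", "PORTAL", "GAME"]
--
--     result = []
--
--     for tb in table:
--         split_table = tb.split()
--         table_dic[split_table[0]] = split_table[1:][::-1]
--
--     for com in company:
--         score = 0
--         for i in range(len(languages)):
--             if languages[i] in table_dic[com]:
--                 score += (preference[i] * (table_dic[com].index(languages[i]) + 1))
--             else:
--                 continue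
--         result.append([score, com])
--
--     sorted_result = sorted(result, key=lambda x: (-x[0], x[1]))
--
--     answer = sorted_result[0][-1]
--
--     return answer
-- ===== SOURCE B (Python) =====
-- def solution(table, languages, preference):
--     # total preference weight per language (one pass over the parallel lists)
--     pref = {}
--     for lang, p in zip(languages, preference):
--         pref[lang] = pref.get(lang, 0) + p
--
--     # category -> its ranked language list (as written, highest rank first)
--     ranked = {}
--     for row in table:
--         toks = row.split()
--         ranked[toks[0]] = toks[1:]
--
--     # single pass over the five categories keeping the running best
--     best_score, best_com = None, None
--     for com in ["SI", "CONTENTS", "HARDWARE", "PORTAL", "GAME"]: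
--         langs = ranked.get(com, [])
--         n = len(langs)
--         score = 0
--         for j, l in enumerate(langs):
--             score += pref.get(l, 0) * (n - j)
--         if best_com is None or score > best_score or (score == best_score and com < best_com):
--             best_score, best_com = score, com
--     return best_com
-- ===== Notes on version B (the rewrite author's own statement) =====
-- stated objective: alternative
-- what changed: Instead of A's five-fold scan of the user's languages with membership test plus .index on each reversed table row followed by a sort of the five [score,name] pairs, B aggregates preferences per language into one dict, scores each category by walking that category's own language list once with rank = n - position (no reversing, no .index), and picks the winner with a single running-best pass (strictly-better-or-alphabetically-smaller-tie update) instead of sorting.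
-- outside the precondition, e.g. on solution(['SI A A', 'CONTENTS A'], ['A'], [1]): A returns 'CONTENTS', B returns 'SI'; on solution(['SI A B'], ['A', 'B'], [1]): A raises IndexError, B returns 'SI'
import Mathlib
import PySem

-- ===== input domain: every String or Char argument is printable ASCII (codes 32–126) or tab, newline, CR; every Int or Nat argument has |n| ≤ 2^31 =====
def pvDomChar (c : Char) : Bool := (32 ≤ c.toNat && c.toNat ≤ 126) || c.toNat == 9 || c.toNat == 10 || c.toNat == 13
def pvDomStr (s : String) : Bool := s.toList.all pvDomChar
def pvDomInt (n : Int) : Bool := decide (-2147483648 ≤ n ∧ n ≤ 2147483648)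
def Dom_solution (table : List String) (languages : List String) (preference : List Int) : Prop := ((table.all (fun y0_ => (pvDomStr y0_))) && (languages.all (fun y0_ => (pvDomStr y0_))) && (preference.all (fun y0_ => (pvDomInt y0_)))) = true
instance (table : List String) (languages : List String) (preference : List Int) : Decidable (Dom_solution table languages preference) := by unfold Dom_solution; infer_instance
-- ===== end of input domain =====

-- B replaces A's membership+.index scan of each reversed table row per user language, plus a sort
-- of the five [score,name] pairs, by a per-language preference dict, a single walk over each
-- category's own language list (rank = n - position) and a running-best selection (alternative
-- decomposition, return value only; no argument is mutated by either version).

-- the five fixed categories (shared literal constant)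
def pvCompany : List String := ["SI", "CONTENTS", "HARDWARE", "PORTAL", "GAME"]

-- ===== PORT A =====
-- st[0] is ported as pyGetD with default "" — Python raises IndexError there; Pre_ excludes those inputs.
def solution (table : List String) (languages : List String) (preference : List Int) : String :=
  let table_dic := table.foldl
    (fun d tb =>
      let split_table := PySem.Str.split₀ tb
      d.insert (PySem.List.pyGetD split_table 0 "")
        ((PySem.List.slice? (PySem.List.slice split_table (some 1) none) none none (-1)).getD []))
    PySem.Dict.empty
  let result := pvCompany.foldl
    (fun res com =>
      let row := table_dic.getD com []
      let score := (PySem.List.pyRange 0 (PySem.List.len languages) 1).foldl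
        (fun score i =>
          if PySem.List.pyGetD languages i "" ∈ row then
            score + PySem.List.pyGetD preference i 0 *
              (((PySem.List.index? row (PySem.List.pyGetD languages i "")).getD 0 : Int) + 1)
          else score) 0
      res ++ [(score, com)])
    ([] : List (Int × String))
  let sorted_result := PySem.List.sorted2 result (fun x => -x.1) (fun x => x.2)
  (PySem.List.pyGetD sorted_result 0 (0, "")).2

-- ===== PORT B =====
-- toks[0] is ported as pyGetD with default "" — Python raises IndexError there; Pre_ excludes those inputs.
def solution_alt (table : List String) (languages : List String) (preference : List Int) : String :=
  let pref := (languages.zip preference).foldl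
    (fun d lp => d.insert lp.1 (d.getD lp.1 0 + lp.2)) PySem.Dict.empty
  let ranked := table.foldl
    (fun d row =>
      let toks := PySem.Str.split₀ row
      d.insert (PySem.List.pyGetD toks 0 "") (PySem.List.slice toks (some 1) none))
    PySem.Dict.empty
  let best := pvCompany.foldl
    (fun best com =>
      let langs := ranked.getD com []
      let n : Int := PySem.List.len langs
      let score := (PySem.List.enumerate langs 0).foldl
        (fun s jl => s + pref.getD jl.2 0 * (n - jl.1)) 0
      match best with
      | none => some (score, com)
      | some b =>
          if decide (b.1 < score) || (score == b.1 && decide (com < b.2)) then some (score, com)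
          else some b)
    (none : Option (Int × String))
  match best with
  | some b => b.2
  | none => ""

-- ===== PRECONDITION & SPEC =====
-- Pre_ excludes whitespace-only table rows (A raises IndexError on split()[0]), inputs where a user
-- language beyond the end of the shorter preference list occurs in some row's language list (A raises
-- IndexError on preference[i] for every row that counts; mismatched parallel lists are an unspecified
-- corner), and rows listing the same language twice (A scores the first match in the reversed row, B
-- counts every occurrence — a duplicate-entry corner where either reading is defensible).
def Pre_solution (table : List String) (languages : List String) (preference : List Int) : Prop :=
  (∀ tb ∈ table, PySem.Str.split₀ tb ≠ [] ∧ ((PySem.Str.split₀ tb).drop 1).Nodup) ∧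
  (∀ lang ∈ languages.drop preference.length,
     ∀ tb ∈ table, lang ∉ (PySem.Str.split₀ tb).drop 1)

instance (table : List String) (languages : List String) (preference : List Int) :
    Decidable (Pre_solution table languages preference) := by unfold Pre_solution; infer_instance

def pvWitness_solution : List String × List String × List Int :=
  (["SI PYTHON JAVA", "GAME C"], ["PYTHON", "C"], [4, 2])

def Spec_solution (table : List String) (languages : List String) (preference : List Int) (out : String) : Prop := out = solution_alt table languages preference
instance (table : List String) (languages : List String) (preference : List Int) (out : String) : Decidable (Spec_solution table languages preference out) := by unfold Spec_solution; infer_instance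

-- ===== CLAIM (what is proved, stated in full; the proofs are below) =====
def Claim_equal_solution : Prop := ∀ (table : List String) (languages : List String) (preference : List Int), Dom_solution table languages preference → Pre_solution table languages preference → Spec_solution table languages preference (solution table languages preference)

-- ===== LEMMAS AND PROOFS =====

-- (1) head of one insertion
lemma pv_head_insertBy {α : Type} (bf : α → α → Bool) (x : α) (acc : List α) :
    (PySem.List.insertBy bf x acc).head? =
      (match acc.head? with
       | none => some x
       | some y => if bf x y then some x else some y) := by
  cases acc with
  | nil => rfl
  | cons y ys =>
      simp only [PySem.List.insertBy, List.head?_cons]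
      split <;> simp

-- (2) head of insertion-sort fold = running-best fold
lemma pv_head_foldl_insertBy {α : Type} (bf : α → α → Bool) :
    ∀ (l acc : List α),
    (l.foldl (fun a x => PySem.List.insertBy bf x a) acc).head? =
    l.foldl (fun b x =>
      (match b with
       | none => some x
       | some y => if bf x y then some x else some y)) acc.head?
  | [], _ => rfl
  | x :: l, acc => by
      rw [List.foldl_cons, List.foldl_cons, pv_head_foldl_insertBy bf l, pv_head_insertBy]

-- (3) the sorted2 comparison equals B's running-best test
lemma pv_bf_eq (x y : Int × String) :
    (decide ((-x.1) < -y.1) || (!decide ((-y.1) < -x.1) && decide (x.2 < y.2)))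
    = (decide (y.1 < x.1) || (x.1 == y.1 && decide (x.2 < y.2))) := by
  simp only [neg_lt_neg_iff]
  by_cases h : x.1 = y.1
  · simp [h]
  · have h3 : (x.1 == y.1) = false := by simp [h]
    by_cases h2 : y.1 < x.1
    · have : ¬ x.1 < y.1 := by omega
      simp [h2, this, h3]
    · have : x.1 < y.1 := by omega
      simp [h2, this, h3]

-- per-language total preference weight
def pvW (pairs : List (String × Int)) (x : String) : Int :=
  (pairs.map (fun lp => if lp.1 = x then lp.2 else 0)).sum

-- (5) the preference dict built by B reads back pvW
lemma pv_getD_prefdict :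
    ∀ (pairs : List (String × Int)) (d : PySem.Dict String Int) (x : String),
    (pairs.foldl (fun d lp => d.insert lp.1 (d.getD lp.1 0 + lp.2)) d).getD x 0
    = d.getD x 0 + pvW pairs x
  | [], d, x => by simp [pvW]
  | lp :: rest, d, x => by
      rw [List.foldl_cons, pv_getD_prefdict rest]
      rw [PySem.Dict.getD_insert]
      simp only [pvW, List.map_cons, List.sum_cons]
      by_cases h : lp.1 = x
      · subst h; simp; ring
      · simp [Ne.symm h, h]

-- (6) sum over an enumerated nodup-free list of a single-language indicator
lemma pv_sum_enum_single (l : String) (g : Int → Int) :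
    ∀ (r : List String) (s : Int), r.Nodup →
    ((PySem.List.enumerate r s).map (fun jx => if jx.2 = l then g jx.1 else 0)).sum
    = if l ∈ r then g (s + (((PySem.List.index? r l).getD 0 : Nat) : Int)) else 0
  | [], s, _ => by simp [PySem.List.enumerate_nil]
  | y :: r, s, hnd => by
      have hnd' : r.Nodup := hnd.of_cons
      rw [PySem.List.enumerate_cons, List.map_cons, List.sum_cons,
          pv_sum_enum_single l g r (s + 1) hnd']
      by_cases h : y = l
      · subst h
        have hy : y ∉ r := (List.nodup_cons.mp hnd).1
        rw [PySem.List.index?_cons_self]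
        simp [hy]
      · rw [PySem.List.index?_cons_of_ne r h]
        by_cases hm : l ∈ r
        · obtain ⟨k, hk⟩ : ∃ k, PySem.List.index? r l = some k :=
            Option.isSome_iff_exists.mp ((PySem.List.index?_isSome_iff r l).mpr hm)
          rw [hk]
          simp [h, hm]
          ring_nf
        · have hm' : l ∉ y :: r := by simp [Ne.symm h, hm]
          have : PySem.List.index? r l = none := (PySem.List.index?_eq_none_iff r l).mpr hm
          rw [this]
          simp [hm, hm', h]

-- (7) index in the reversed nodup list
lemma pv_index_reverse (r : List String) (l : String) (hnd : r.Nodup) (hm : l ∈ r) :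
    (((PySem.List.index? r.reverse l).getD 0 : Nat) : Int) + 1
    = (r.length : Int) - (((PySem.List.index? r l).getD 0 : Nat) : Int) := by
  obtain ⟨k, hk⟩ : ∃ k, PySem.List.index? r l = some k :=
    Option.isSome_iff_exists.mp ((PySem.List.index?_isSome_iff r l).mpr hm)
  obtain ⟨pre, suf, hr, hpre, hnp⟩ := (PySem.List.index?_eq_some_iff r l k).mp hk
  have hns : l ∉ suf := by
    subst hr
    have := (List.nodup_append.mp hnd).2.1
    exact (List.nodup_cons.mp this).1
  have hrev : PySem.List.index? r.reverse l = some suf.reverse.length := by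
    apply (PySem.List.index?_eq_some_iff r.reverse l suf.reverse.length).mpr
    refine ⟨suf.reverse, pre.reverse, ?_, rfl, by simpa using hns⟩
    subst hr; simp
  have hlen : r.length = pre.length + 1 + suf.length := by subst hr; simp; omega
  rw [hk, hrev]
  simp [hlen, hpre]
  omega

-- (8a) scoring a nodup row against pvW weights equals A's per-(language,preference) terms
lemma pv_row_score_w (row : List String) (hnd : row.Nodup) :
    ∀ (pairs : List (String × Int)),
    ((PySem.List.enumerate row 0).map
      (fun jl => pvW pairs jl.2 * ((row.length : Int) - jl.1))).sum
    = (pairs.map (fun lp => if lp.1 ∈ row.reverse then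
        lp.2 * ((((PySem.List.index? row.reverse lp.1).getD 0 : Nat) : Int) + 1) else 0)).sum
  | [] => by simp [pvW]
  | lp :: rest => by
      have hsplit : ∀ jl : Int × String,
          pvW (lp :: rest) jl.2 * ((row.length : Int) - jl.1)
          = (if jl.2 = lp.1 then lp.2 * ((row.length : Int) - jl.1) else 0)
            + pvW rest jl.2 * ((row.length : Int) - jl.1) := by
        intro jl
        simp only [pvW, List.map_cons, List.sum_cons]
        by_cases h : lp.1 = jl.2 <;> simp [h, Ne.symm] <;> try ring
      calc ((PySem.List.enumerate row 0).map
              (fun jl => pvW (lp :: rest) jl.2 * ((row.length : Int) - jl.1))).sum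
          = ((PySem.List.enumerate row 0).map
              (fun jl => (if jl.2 = lp.1 then lp.2 * ((row.length : Int) - jl.1) else 0)
                + pvW rest jl.2 * ((row.length : Int) - jl.1))).sum := by
            exact congrArg List.sum (List.map_congr_left (fun jl _ => hsplit jl))
        _ = ((PySem.List.enumerate row 0).map
              (fun jl => if jl.2 = lp.1 then lp.2 * ((row.length : Int) - jl.1) else 0)).sum
            + ((PySem.List.enumerate row 0).map
              (fun jl => pvW rest jl.2 * ((row.length : Int) - jl.1))).sum := by
            exact PySem.List.sum_map_add_int _ _ _
        _ = (if lp.1 ∈ row.reverse then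
              lp.2 * ((((PySem.List.index? row.reverse lp.1).getD 0 : Nat) : Int) + 1) else 0)
            + (rest.map (fun lp => if lp.1 ∈ row.reverse then
                lp.2 * ((((PySem.List.index? row.reverse lp.1).getD 0 : Nat) : Int) + 1) else 0)).sum := by
            rw [pv_row_score_w row hnd rest,
                pv_sum_enum_single lp.1 (fun j => lp.2 * ((row.length : Int) - j)) row 0 hnd]
            congr 1
            by_cases hm : lp.1 ∈ row
            · have hmr : lp.1 ∈ row.reverse := by simpa using hm
              rw [if_pos hm, if_pos hmr]
              have := pv_index_reverse row lp.1 hnd hm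
              have h2 : (((PySem.List.index? row.reverse lp.1).getD 0 : Nat) : Int) + 1
                  = (row.length : Int) - (((PySem.List.index? row lp.1).getD 0 : Nat) : Int) := this
              rw [h2]
              ring_nf
            · have hmr : lp.1 ∉ row.reverse := by simpa using hm
              rw [if_neg hm, if_neg hmr]
        _ = ((lp :: rest).map (fun lp => if lp.1 ∈ row.reverse then
              lp.2 * ((((PySem.List.index? row.reverse lp.1).getD 0 : Nat) : Int) + 1) else 0)).sum := by
            simp

-- (9) the two table dicts: A stores each row's tail reversed, B stores it as written
lemma pv_tdic (Q : List String → Prop) :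
    ∀ (table : List String) (d1 d2 : PySem.Dict String (List String)),
    (∀ tb ∈ table, Q ((PySem.Str.split₀ tb).tail)) →
    (∀ x, d1.getD x [] = (d2.getD x []).reverse ∧ Q (d2.getD x [])) →
    ∀ x,
    (table.foldl (fun d tb =>
        d.insert (PySem.List.pyGetD (PySem.Str.split₀ tb) 0 "") (PySem.Str.split₀ tb).tail.reverse) d1).getD x []
      = ((table.foldl (fun d tb =>
        d.insert (PySem.List.pyGetD (PySem.Str.split₀ tb) 0 "") (PySem.Str.split₀ tb).tail) d2).getD x []).reverse
    ∧ Q ((table.foldl (fun d tb =>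
        d.insert (PySem.List.pyGetD (PySem.Str.split₀ tb) 0 "") (PySem.Str.split₀ tb).tail) d2).getD x [])
  | [], d1, d2, _, hinv, x => hinv x
  | tb :: rest, d1, d2, hrows, hinv, x => by
      rw [List.foldl_cons, List.foldl_cons]
      apply pv_tdic Q rest _ _ (fun t ht => hrows t (List.mem_cons_of_mem tb ht))
      intro y
      rw [PySem.Dict.getD_insert, PySem.Dict.getD_insert]
      by_cases h : y = PySem.List.pyGetD (PySem.Str.split₀ tb) 0 ""
      · simp only [if_pos h]
        exact ⟨trivial, hrows tb (List.mem_cons_self)⟩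
      · simp only [if_neg h]
        exact hinv y

-- (10) A's per-category score over the user's languages equals B's walk over the row
lemma pv_score_eq (languages : List String) (preference : List Int) (row : List String)
    (hextra : ∀ lang ∈ languages.drop preference.length, lang ∉ row) (hnd : row.Nodup) :
    (PySem.List.pyRange 0 (PySem.List.len languages) 1).foldl
      (fun score i =>
        if PySem.List.pyGetD languages i "" ∈ row.reverse then
          score + PySem.List.pyGetD preference i 0 *
            (((PySem.List.index? row.reverse (PySem.List.pyGetD languages i "")).getD 0 : Int) + 1)
        else score) 0
    = (PySem.List.enumerate row 0).foldl
      (fun s jl => s + ((languages.zip preference).foldl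
          (fun d lp => d.insert lp.1 (d.getD lp.1 0 + lp.2)) PySem.Dict.empty).getD jl.2 0
        * ((PySem.List.len row) - jl.1)) 0 := by
  have hK : (languages.zip preference).length = min languages.length preference.length := by
    simp
  have hKle : ((languages.zip preference).length : Int) ≤ (languages.length : Int) := by
    simp [hK]
  have hsplit : PySem.List.pyRange 0 (PySem.List.len languages) 1
      = PySem.List.pyRange 0 ((languages.zip preference).length : Int) 1
        ++ PySem.List.pyRange ((languages.zip preference).length : Int) (PySem.List.len languages) 1 := by
    rw [PySem.List.len_eq]
    exact PySem.List.pyRange_one_append 0 _ _ (by omega) hKle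
  rw [hsplit, List.foldl_append]
  -- indices past the zip's end never hit the row, so that segment is a no-op
  have htail : ∀ (s : Int), ∀ i ∈ PySem.List.pyRange ((languages.zip preference).length : Int)
      (PySem.List.len languages) 1,
      (if PySem.List.pyGetD languages i "" ∈ row.reverse then
          s + PySem.List.pyGetD preference i 0 *
            (((PySem.List.index? row.reverse (PySem.List.pyGetD languages i "")).getD 0 : Int) + 1)
        else s)
      = (fun (s : Int) (_ : Int) => s) s i := by
    intro s i hi
    rw [PySem.List.mem_pyRange_one] at hi
    simp only [PySem.List.len_eq] at hi
    have h0 : ((languages.zip preference).length : Int) ≤ i := hi.1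
    have h1 : i < (languages.length : Int) := hi.2
    have hiN : i.toNat < languages.length := by omega
    have hPle : preference.length ≤ i.toNat := by
      have := hK; omega
    have hmem : PySem.List.pyGetD languages i "" ∈ languages.drop preference.length := by
      rw [PySem.List.pyGetD_eq_getElem _ _ (by omega) (by exact_mod_cast h1)]
      have hj : i.toNat - preference.length < (languages.drop preference.length).length := by
        simp [List.length_drop]; omega
      have : (languages.drop preference.length)[i.toNat - preference.length]'hj
          = languages[i.toNat]'hiN := by
        rw [List.getElem_drop]
        congr 1
        omega
      rw [← this]
      exact List.getElem_mem hj
    have hnr : PySem.List.pyGetD languages i "" ∉ row.reverse := by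
      simpa using hextra _ hmem
    rw [if_neg hnr]
  rw [PySem.List.foldl_congr_mem _ _ _ _ htail, PySem.List.foldl_ignore]
  have hcongr : ∀ (s : Int), ∀ i ∈ PySem.List.pyRange 0 ((languages.zip preference).length : Int) 1,
      (if PySem.List.pyGetD languages i "" ∈ row.reverse then
          s + PySem.List.pyGetD preference i 0 *
            (((PySem.List.index? row.reverse (PySem.List.pyGetD languages i "")).getD 0 : Int) + 1)
        else s)
      = (fun (s : Int) (lp : String × Int) =>
          if lp.1 ∈ row.reverse then
            s + lp.2 * (((PySem.List.index? row.reverse lp.1).getD 0 : Int) + 1)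
          else s) s (PySem.List.pyGetD (languages.zip preference) i ("", 0)) := by
    intro s i hi
    rw [PySem.List.mem_pyRange_one] at hi
    have h0 : 0 ≤ i := hi.1
    have h1 : i < ((languages.zip preference).length : Int) := hi.2
    have hiN : i.toNat < (languages.zip preference).length := by omega
    have hz : PySem.List.pyGetD (languages.zip preference) i ("", 0)
        = (languages[i.toNat]'(by omega), preference[i.toNat]'(by omega)) := by
      rw [PySem.List.pyGetD_eq_getElem _ _ h0 (by exact_mod_cast h1)]
      exact List.getElem_zip
    have hl : PySem.List.pyGetD languages i "" = languages[i.toNat]'(by omega) :=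
      PySem.List.pyGetD_eq_getElem _ _ h0 (by omega)
    have hp : PySem.List.pyGetD preference i 0 = preference[i.toNat]'(by omega) :=
      PySem.List.pyGetD_eq_getElem _ _ h0 (by omega)
    rw [hz, hl, hp]
  rw [PySem.List.foldl_congr_mem _ _ _ _ hcongr]
  rw [PySem.List.foldl_pyRange_zero_pyGetD' (languages.zip preference) ("", 0)
    (fun s lp => if lp.1 ∈ row.reverse then
        s + lp.2 * (((PySem.List.index? row.reverse lp.1).getD 0 : Int) + 1) else s) 0]
  -- push the if inside as an additive term, then sum both sides
  have hA : (languages.zip preference).foldl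
      (fun s lp => if lp.1 ∈ row.reverse then
        s + lp.2 * (((PySem.List.index? row.reverse lp.1).getD 0 : Int) + 1) else s) 0
      = ((languages.zip preference).map (fun lp => if lp.1 ∈ row.reverse then
          lp.2 * (((PySem.List.index? row.reverse lp.1).getD 0 : Int) + 1) else 0)).sum := by
    rw [PySem.List.foldl_congr_mem _ _
      (fun s lp => s + (if lp.1 ∈ row.reverse then
          lp.2 * (((PySem.List.index? row.reverse lp.1).getD 0 : Int) + 1) else 0)) _
      (by intro s lp _; by_cases h : lp.1 ∈ row.reverse <;> simp [h])]
    rw [PySem.List.foldl_add]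
    simp
  have hB : (PySem.List.enumerate row 0).foldl
      (fun s jl => s + ((languages.zip preference).foldl
          (fun d lp => d.insert lp.1 (d.getD lp.1 0 + lp.2)) PySem.Dict.empty).getD jl.2 0
        * ((PySem.List.len row) - jl.1)) 0
      = ((PySem.List.enumerate row 0).map
          (fun jl => pvW (languages.zip preference) jl.2 * ((row.length : Int) - jl.1))).sum := by
    rw [PySem.List.foldl_add]
    simp only [PySem.List.len_eq, zero_add]
    congr 1
    apply List.map_congr_left
    intro jl _
    rw [pv_getD_prefdict, PySem.Dict.getD_empty, zero_add]
  rw [hA, hB, pv_row_score_w row hnd (languages.zip preference)]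

lemma pv_main (table : List String) (languages : List String) (preference : List Int)
    (hpre : Pre_solution table languages preference) :
    solution table languages preference = solution_alt table languages preference := by
  obtain ⟨hrows, hext⟩ := hpre
  unfold solution solution_alt
  simp only [PySem.List.slice_from_one, PySem.List.slice?_none_none_neg_one, Option.getD_some]
  have hrows' : ∀ tb ∈ table, ((PySem.Str.split₀ tb).tail).Nodup
      ∧ ∀ lang ∈ languages.drop preference.length, lang ∉ (PySem.Str.split₀ tb).tail := by
    intro tb h
    refine ⟨by simpa [List.drop_one] using (hrows tb h).2, ?_⟩
    intro lang hl
    have := hext lang hl tb h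
    simpa [List.drop_one] using this
  have hdic := pv_tdic (fun v => v.Nodup ∧ ∀ lang ∈ languages.drop preference.length, lang ∉ v)
    table PySem.Dict.empty PySem.Dict.empty hrows'
    (by intro x; simp [PySem.Dict.getD_empty])
  set dA := table.foldl (fun d tb =>
      d.insert (PySem.List.pyGetD (PySem.Str.split₀ tb) 0 "") (PySem.Str.split₀ tb).tail.reverse)
      PySem.Dict.empty with hdA
  set dB := table.foldl (fun d tb =>
      d.insert (PySem.List.pyGetD (PySem.Str.split₀ tb) 0 "") (PySem.Str.split₀ tb).tail)
      PySem.Dict.empty with hdB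
  set pref := (languages.zip preference).foldl
      (fun d lp => d.insert lp.1 (d.getD lp.1 0 + lp.2)) PySem.Dict.empty with hprefD
  -- per-category scores
  have hscore : ∀ com : String,
      (PySem.List.pyRange 0 (PySem.List.len languages) 1).foldl
        (fun score i =>
          if PySem.List.pyGetD languages i "" ∈ dA.getD com [] then
            score + PySem.List.pyGetD preference i 0 *
              (((PySem.List.index? (dA.getD com []) (PySem.List.pyGetD languages i "")).getD 0 : Int) + 1)
          else score) 0
      = (PySem.List.enumerate (dB.getD com []) 0).foldl
        (fun s jl => s + pref.getD jl.2 0 * ((PySem.List.len (dB.getD com [])) - jl.1)) 0 := by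
    intro com
    have h1 := (hdic com).1
    have h2 := (hdic com).2
    rw [h1, hprefD]
    exact pv_score_eq languages preference (dB.getD com []) h2.2 h2.1
  -- A's result list is a map over the five categories
  rw [PySem.List.foldl_append_singleton_eq_map
    (fun com => ((PySem.List.pyRange 0 (PySem.List.len languages) 1).foldl
        (fun score i =>
          if PySem.List.pyGetD languages i "" ∈ dA.getD com [] then
            score + PySem.List.pyGetD preference i 0 *
              (((PySem.List.index? (dA.getD com []) (PySem.List.pyGetD languages i "")).getD 0 : Int) + 1)
          else score) 0, com)) pvCompany []]
  rw [List.nil_append]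
  have hmap : (fun com => ((PySem.List.pyRange 0 (PySem.List.len languages) 1).foldl
        (fun score i =>
          if PySem.List.pyGetD languages i "" ∈ dA.getD com [] then
            score + PySem.List.pyGetD preference i 0 *
              (((PySem.List.index? (dA.getD com []) (PySem.List.pyGetD languages i "")).getD 0 : Int) + 1)
          else score) 0, com))
      = (fun com => ((PySem.List.enumerate (dB.getD com []) 0).foldl
          (fun s jl => s + pref.getD jl.2 0 * ((PySem.List.len (dB.getD com [])) - jl.1)) 0, com)) := by
    funext com
    rw [hscore com]
  rw [hmap]
  set g := (fun com => ((PySem.List.enumerate (dB.getD com []) 0).foldl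
          (fun s jl => s + pref.getD jl.2 0 * ((PySem.List.len (dB.getD com [])) - jl.1)) 0, com)) with hg
  set L := pvCompany.map g with hL
  -- B's running-best loop is a fold of the same step over L
  rw [show (pvCompany.foldl (fun best com =>
        match best with
        | none => some (g com)
        | some b => if decide (b.1 < (g com).1) || ((g com).1 == b.1 && decide ((g com).2 < b.2))
            then some (g com) else some b) (none : Option (Int × String)))
      = L.foldl (fun b x =>
        match b with
        | none => some x
        | some y => if decide (y.1 < x.1) || (x.1 == y.1 && decide (x.2 < y.2)) then some x else some y)
        (none : Option (Int × String)) from by rw [List.foldl_map]]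
  -- head of the insertion sort = running best with the sorted2 comparison
  have hsorted : PySem.List.sorted2 L (fun x => -x.1) (fun x => x.2) false
      = L.foldl (fun acc x => PySem.List.insertBy
          (fun a b => decide ((-a.1) < -b.1) || (!decide ((-b.1) < -a.1) && decide (a.2 < b.2))) x acc) [] := rfl
  have hhead : (PySem.List.sorted2 L (fun x => -x.1) (fun x => x.2) false).head?
      = L.foldl (fun b x =>
          match b with
          | none => some x
          | some y => if decide (y.1 < x.1) || (x.1 == y.1 && decide (x.2 < y.2)) then some x else some y)
          (none : Option (Int × String)) := by
    rw [hsorted, pv_head_foldl_insertBy]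
    rw [List.head?_nil]
    apply PySem.List.foldl_congr_mem
    intro b x _
    cases b with
    | none => rfl
    | some y => dsimp only; rw [pv_bf_eq]
  -- the sorted list is nonempty
  have hlen5 : (PySem.List.sorted2 L (fun x => -x.1) (fun x => x.2) false).length = 5 := by
    rw [(PySem.List.sorted2_perm L _ _ false).length_eq, hL, List.length_map]
    rfl
  cases hs : PySem.List.sorted2 L (fun x => -x.1) (fun x => x.2) false with
  | nil => rw [hs] at hlen5; simp at hlen5
  | cons h t =>
      rw [hs] at hhead
      rw [List.head?_cons] at hhead
      rw [← hhead, PySem.List.pyGetD_zero_cons]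

-- ===== VERDICT (by name: the statement is the Claim_ definition above) =====
theorem solution_spec : Claim_equal_solution := by
  intro table languages preference _ hpre
  unfold Spec_solution
  exact pv_main table languages preference hpre
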